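-- pv_equiv track=rewrite | github.com/good-code22/answer-my-question-bank | main.py | giveIndividualQuestion
-- ===== SOURCE A (Python) =====
-- def giveIndividualQuestion(questionBank):
--     count = 1
--     question_dict = {}
--     line0 = []
--
--     for line in questionBank:
--         if "#" in line:
--             # we could find index of # to make it seperate questions on same line but
--
--             question_dict[count] = "".join(line0) + line
--             line0 = []
--             count += 1
--         else: line0.append(line)
--
--     # If there's any leftover content in line0 (in case no '#' is in the last question)
--     if line0:
--         question_dict[count] = ''.join(line0)
--     return question_dict
-- ===== SOURCE B (Python) =====
-- def _segments(lines):
--     # recursive split on the first '#' line: that segment (delimiter included), then the rest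
--     for i, l in enumerate(lines):
--         if "#" in l:
--             return ["".join(lines[:i + 1])] + _segments(lines[i + 1:])
--     if lines:
--         return ["".join(lines)]
--     return []
--
--
-- def giveIndividualQuestion(questionBank):
--     return {i: s for i, s in enumerate(_segments(list(questionBank)), start=1)}
-- ===== Notes on version B (the rewrite author's own statement) =====
-- stated objective: alternative
-- what changed: Replaces A's single-pass running-buffer-plus-counter dict build with a recursive split-on-first-'#'-line decomposition: find the first delimiter line, join that whole slice as one segment, recurse on the rest, and number the resulting segment list at the end.
import Mathlib
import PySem

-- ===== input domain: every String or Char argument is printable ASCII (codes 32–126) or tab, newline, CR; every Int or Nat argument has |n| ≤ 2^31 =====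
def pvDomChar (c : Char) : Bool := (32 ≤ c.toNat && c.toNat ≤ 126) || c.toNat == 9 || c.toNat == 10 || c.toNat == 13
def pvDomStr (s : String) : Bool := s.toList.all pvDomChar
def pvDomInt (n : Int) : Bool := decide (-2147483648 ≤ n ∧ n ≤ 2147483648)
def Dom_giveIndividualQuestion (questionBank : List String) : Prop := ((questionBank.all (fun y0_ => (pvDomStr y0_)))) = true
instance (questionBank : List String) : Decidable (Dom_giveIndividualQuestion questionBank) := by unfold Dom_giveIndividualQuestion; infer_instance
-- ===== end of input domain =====

-- B replaces A's running-buffer accumulator with a recursive split-on-first-'#'-line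
-- decomposition (alternative structure, same cost); A = B is proved on all inputs.


-- ===== PORT A =====
-- loop body of A: state is (count, question_dict, line0)
def aStep (st : Int × PySem.Dict Int String × List String) (line : String) :
    Int × PySem.Dict Int String × List String :=
  if PySem.Str.isIn "#" line then
    (st.1 + 1, (st.2.1).insert st.1 (PySem.Str.join "" st.2.2 ++ line), [])
  else
    (st.1, st.2.1, st.2.2 ++ [line])

def giveIndividualQuestion (questionBank : List String) : List (Int × String) :=
  let st := questionBank.foldl aStep (1, PySem.Dict.empty, [])
  let qd := if st.2.2 ≠ [] then (st.2.1).insert st.1 (PySem.Str.join "" st.2.2) else st.2.1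
  qd.items

-- ===== PORT B =====
-- Source B's _segments: find the first line containing '#'; that whole slice (lines[:i+1],
-- joined) is one segment, recurse on lines[i+1:]; a nonempty leftover is the last segment.
-- (lines[:i+1] / lines[i+1:] with 0 ≤ i+1 are exactly take/drop.)
def bSegs (lines : List String) : List String :=
  match h : lines.findIdx? (fun l => PySem.Str.isIn "#" l) with
  | some i => PySem.Str.join "" (lines.take (i + 1)) :: bSegs (lines.drop (i + 1))
  | none => if lines.isEmpty then [] else [PySem.Str.join "" lines]
termination_by lines.length
decreasing_by
  simp only [List.length_drop]
  have hne : lines ≠ [] := by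
    intro hnil; rw [hnil] at h; simp at h
  have : 0 < lines.length := List.length_pos_iff.mpr hne
  omega

-- the dict comprehension over enumerate(_, start=1): fresh increasing keys, insertion order
def enumFrom (c : Int) : List String → List (Int × String)
  | [] => []
  | s :: ss => (c, s) :: enumFrom (c + 1) ss

def giveIndividualQuestion_alt (questionBank : List String) : List (Int × String) :=
  enumFrom 1 (bSegs questionBank)

-- ===== PRECONDITION & SPEC =====
def Spec_giveIndividualQuestion (questionBank : List String) (out : List (Int × String)) : Prop := out = giveIndividualQuestion_alt questionBank
instance (questionBank : List String) (out : List (Int × String)) : Decidable (Spec_giveIndividualQuestion questionBank out) := by unfold Spec_giveIndividualQuestion; infer_instance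

-- ===== CLAIM (what is proved, stated in full; the proofs are below) =====
def Claim_equal_giveIndividualQuestion : Prop := ∀ (questionBank : List String), Dom_giveIndividualQuestion questionBank → Spec_giveIndividualQuestion questionBank (giveIndividualQuestion questionBank)

-- ===== LEMMAS AND PROOFS =====

-- reference splitter: pending buffer made explicit
def segsP (pending : List String) : List String → List String
  | [] => if pending.isEmpty then [] else [PySem.Str.join "" pending]
  | l :: ls =>
      if PySem.Str.isIn "#" l then (PySem.Str.join "" pending ++ l) :: segsP [] ls
      else segsP (pending ++ [l]) ls

-- "".join over List Char with empty separator is flatten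
theorem charsJoin_nil_eq_flatten (l : List (List Char)) :
    PySem.Chars.join [] l = l.flatten := by
  induction l with
  | nil => simp [PySem.Chars.join, List.intercalate]
  | cons a r ih =>
    cases r with
    | nil => simp [PySem.Chars.join, List.intercalate]
    | cons b r' =>
      rw [PySem.Chars.join_cons_cons]
      simp only [List.flatten_cons] at ih ⊢
      rw [ih]; simp

theorem join_empty_append (p q : List String) :
    PySem.Str.join "" (p ++ q) = PySem.Str.join "" p ++ PySem.Str.join "" q := by
  apply String.toList_inj.mp
  rw [String.toList_append, PySem.Str.toList_join, PySem.Str.toList_join, PySem.Str.toList_join]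
  simp [charsJoin_nil_eq_flatten]

theorem join_empty_singleton (l : String) : PySem.Str.join "" [l] = l := by
  apply String.toList_inj.mp
  rw [PySem.Str.toList_join]
  simp

-- characterisation of segsP by the first delimiter index
theorem segsP_eq_find (ls : List String) : ∀ pending,
    segsP pending ls =
      match ls.findIdx? (fun l => PySem.Str.isIn "#" l) with
      | some i => PySem.Str.join "" (pending ++ ls.take (i + 1)) :: segsP [] (ls.drop (i + 1))
      | none => if (pending ++ ls).isEmpty then [] else [PySem.Str.join "" (pending ++ ls)] := by
  induction ls with
  | nil => intro pending; simp [segsP]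
  | cons l ls ih =>
    intro pending
    by_cases hd : PySem.Str.isIn "#" l
    · rw [segsP, if_pos hd]
      simp only [List.findIdx?_cons, hd]
      simp only [if_pos trivial, List.take_succ_cons, List.take_zero, List.drop_succ_cons,
        List.drop_zero]
      rw [join_empty_append, join_empty_singleton]
    · rw [segsP, if_neg hd, ih (pending ++ [l])]
      simp only [List.findIdx?_cons, hd]
      simp only [Bool.false_eq_true, if_neg (by simp : ¬False)]
      cases hfi : ls.findIdx? (fun l => PySem.Str.isIn "#" l) with
      | some i => simp [List.take_succ_cons, List.drop_succ_cons, List.append_assoc]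
      | none => simp [List.append_assoc]

-- B computes segsP [] (strong induction on length)
theorem bSegs_eq_segsP (ls : List String) : bSegs ls = segsP [] ls := by
  induction hn : ls.length using Nat.strong_induction_on generalizing ls with
  | _ n ih =>
    rw [bSegs, segsP_eq_find ls []]
    cases hfi : ls.findIdx? (fun l => PySem.Str.isIn "#" l) with
    | some i =>
      simp only [List.nil_append]
      congr 1
      have hne : ls ≠ [] := by intro hnil; rw [hnil] at hfi; simp at hfi
      have hlen : (ls.drop (i + 1)).length < n := by
        subst hn; simp only [List.length_drop]
        have : 0 < ls.length := List.length_pos_iff.mpr hne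
        omega
      exact ih _ hlen _ rfl
    | none => simp

-- A's loop invariant: with all dict keys < count, the finished fold appends
-- the numbered segments of (pending, rest) to the items already in the dict
theorem aLoop_inv (ls : List String) : ∀ (c : Int) (d : PySem.Dict Int String) (p : List String),
    (∀ k ∈ d.keys, k < c) →
    (let st := ls.foldl aStep (c, d, p)
     (if st.2.2 ≠ [] then (st.2.1).insert st.1 (PySem.Str.join "" st.2.2) else st.2.1).items)
      = d.items ++ enumFrom c (segsP p ls) := by
  induction ls with
  | nil =>
    intro c d p hk
    simp only [List.foldl_nil, segsP]
    have hnc : d.contains c = false := by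
      rw [← Bool.not_eq_true, PySem.Dict.contains_iff_mem_keys]
      intro hc; exact absurd (hk c hc) (lt_irrefl c)
    by_cases hp : p = []
    · simp [hp, enumFrom]
    · simp only [hp, if_pos, List.isEmpty_eq_false_iff.mpr hp, ne_eq, not_false_iff,
        Bool.false_eq_true, if_false]
      rw [PySem.Dict.items_insert_of_not_contains _ _ hnc]
      simp [enumFrom]
  | cons l ls ih =>
    intro c d p hk
    by_cases hd : PySem.Str.isIn "#" l
    · have hnc : d.contains c = false := by
        rw [← Bool.not_eq_true, PySem.Dict.contains_iff_mem_keys]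
        intro hc; exact absurd (hk c hc) (lt_irrefl c)
      simp only [List.foldl_cons, aStep, if_pos hd]
      rw [ih (c + 1) _ []]
      · rw [PySem.Dict.items_insert_of_not_contains _ _ hnc]
        have hd' : PySem.Chars.isIn ['#'] l.toList = true := by simpa using hd
        simp [segsP, hd', enumFrom]
      · intro k hkmem
        rw [PySem.Dict.keys_insert_of_not_contains _ _ hnc] at hkmem
        rcases List.mem_append.mp hkmem with h | h
        · exact lt_trans (hk k h) (by omega)
        · simp at h; omega
    · simp only [List.foldl_cons, aStep, if_neg hd]
      rw [ih c d (p ++ [l]) hk]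
      rw [segsP, if_neg hd]

-- ===== VERDICT (by name: the statement is the Claim_ definition above) =====
theorem giveIndividualQuestion_spec : Claim_equal_giveIndividualQuestion := by
  intro questionBank _
  show _ = _
  unfold giveIndividualQuestion giveIndividualQuestion_alt
  rw [bSegs_eq_segsP]
  have h := aLoop_inv questionBank 1 PySem.Dict.empty [] (by simp [PySem.Dict.keys_empty])
  simp only at h
  rw [h]
  rfl
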